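-- pv_equiv track=rewrite | github.com/Crazycoder122/HashCode---2022 | GeneticApproach/utils.py | createClientChoiceGenome
-- ===== SOURCE A (Python) =====
-- def createClientChoiceGenome(like : list,dislike : list,itemsList : list) -> list:
--     ans = [-1] * len(itemsList)
--
--     for i in range(len(itemsList)):
--         if(itemsList[i] in like):
--             ans[i] = 1
--         elif(itemsList[i] in dislike):
--             ans[i] = 0
--         else:
--             continue
--
--     return ans
-- ===== SOURCE B (Python) =====
-- def createClientChoiceGenome(like : list, dislike : list, itemsList : list) -> list:
--     # Inverted (scatter) algorithm: index itemsList once by positions, then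
--     # iterate over dislike and like writing 0/1 into those positions
--     # (like second, so shared items end up 1, matching A's precedence).
--     positions = {}
--     for i, item in enumerate(itemsList):
--         positions.setdefault(item, []).append(i)
--     ans = [-1] * len(itemsList)
--     for item in dislike:
--         for i in positions.get(item, []):
--             ans[i] = 0
--     for item in like:
--         for i in positions.get(item, []):
--             ans[i] = 1
--     return ans
-- ===== Notes on version B (the rewrite author's own statement) =====
-- stated objective: faster
-- what changed: Inverts the iteration: instead of testing each item of itemsList against like/dislike, B indexes itemsList once by positions and then scatters 0s (dislike) and 1s (like, second so it wins on shared items) into a prefilled -1 array.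
import Mathlib
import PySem

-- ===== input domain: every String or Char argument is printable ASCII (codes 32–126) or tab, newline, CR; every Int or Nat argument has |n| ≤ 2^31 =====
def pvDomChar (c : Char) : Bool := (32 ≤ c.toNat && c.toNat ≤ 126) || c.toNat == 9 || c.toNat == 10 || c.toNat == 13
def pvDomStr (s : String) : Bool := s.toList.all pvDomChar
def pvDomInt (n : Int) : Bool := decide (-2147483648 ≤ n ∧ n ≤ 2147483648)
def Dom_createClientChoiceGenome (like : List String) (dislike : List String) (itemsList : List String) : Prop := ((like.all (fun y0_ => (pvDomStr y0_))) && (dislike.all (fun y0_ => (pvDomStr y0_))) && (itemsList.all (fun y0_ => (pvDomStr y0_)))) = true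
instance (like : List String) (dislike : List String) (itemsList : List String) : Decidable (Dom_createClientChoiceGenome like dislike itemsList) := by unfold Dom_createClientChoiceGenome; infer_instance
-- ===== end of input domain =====

-- B inverts the iteration: it indexes itemsList once by positions, then scatters 0s
-- (dislike) and 1s (like, second so it wins on shared items) into a prefilled -1 array.

-- ===== PORT A =====
def createClientChoiceGenome (like : List String) (dislike : List String) (itemsList : List String) : List Int :=
  let ans := List.replicate itemsList.length (-1 : Int)
  (PySem.List.pyRange 0 (itemsList.length : Int) 1).foldl (fun ans i =>
    match PySem.List.pyGet? itemsList i with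
    | some it =>
        if it ∈ like then ans.set i.toNat 1
        else if it ∈ dislike then ans.set i.toNat 0
        else ans
    | none => ans) ans  -- none is unreachable (i ranges over valid indices); guard for totality only

-- ===== PORT B =====
def createClientChoiceGenome_alt (like : List String) (dislike : List String) (itemsList : List String) : List Int :=
  -- positions: item -> list of indices at which it occurs (setdefault(…,[]).append(i))
  let positions := (PySem.List.enumerate itemsList).foldl
      (fun d p => d.insert p.2 (d.getD p.2 [] ++ [p.1]))
      (PySem.Dict.empty : PySem.Dict String (List Int))
  let ans := List.replicate itemsList.length (-1 : Int)
  let ans := dislike.foldl (fun a item =>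
      (positions.getD item []).foldl (fun a i => a.set i.toNat (0 : Int)) a) ans
  like.foldl (fun a item =>
      (positions.getD item []).foldl (fun a i => a.set i.toNat (1 : Int)) a) ans

-- ===== PRECONDITION & SPEC =====
def Spec_createClientChoiceGenome (like : List String) (dislike : List String) (itemsList : List String) (out : List Int) : Prop := out = createClientChoiceGenome_alt like dislike itemsList
instance (like : List String) (dislike : List String) (itemsList : List String) (out : List Int) : Decidable (Spec_createClientChoiceGenome like dislike itemsList out) := by unfold Spec_createClientChoiceGenome; infer_instance

-- ===== CLAIM =====
def Claim_equal_createClientChoiceGenome : Prop := ∀ (like : List String) (dislike : List String) (itemsList : List String), Dom_createClientChoiceGenome like dislike itemsList → Spec_createClientChoiceGenome like dislike itemsList (createClientChoiceGenome like dislike itemsList)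

-- ===== LEMMAS AND PROOFS =====

/-- The value A assigns at an item (as an Option: `none` = leave the slot alone). -/
def pvMark (like dislike : List String) (it : String) : Option Int :=
  if it ∈ like then some 1 else if it ∈ dislike then some 0 else none

/-- A's loop body, named for the lemmas. -/
def pvStep (like dislike itemsList : List String) (ans : List Int) (i : Int) : List Int :=
  match PySem.List.pyGet? itemsList i with
  | some it =>
      if it ∈ like then ans.set i.toNat 1
      else if it ∈ dislike then ans.set i.toNat 0
      else ans
  | none => ans

/-- B's positions dict, named for the lemmas. -/
def pvPos (itemsList : List String) : PySem.Dict String (List Int) :=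
  (PySem.List.enumerate itemsList).foldl
    (fun d p => d.insert p.2 (d.getD p.2 [] ++ [p.1])) PySem.Dict.empty

/-- One step of A's loop, index-wise. -/
lemma step_getElem? (like dislike itemsList : List String) (ans : List Int)
    (hlen : ans.length = itemsList.length) (i : Int) (hi0 : 0 ≤ i) (hin : i.toNat < itemsList.length)
    (j : Nat) :
    (pvStep like dislike itemsList ans i)[j]? =
      if j = i.toNat then (pvMark like dislike (itemsList[i.toNat]'hin)).or ans[j]? else ans[j]? := by
  have hic : i = ((i.toNat : Nat) : Int) := by omega
  have hget : PySem.List.pyGet? itemsList i = some (itemsList[i.toNat]'hin) := by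
    have h := PySem.List.pyGet?_natCast (xs := itemsList) (n := i.toNat)
    rw [← hic] at h
    rw [h, List.getElem?_eq_getElem hin]
  unfold pvStep
  rw [hget]
  dsimp only
  unfold pvMark
  clear hget hic
  by_cases hj : j = i.toNat
  · subst hj
    split_ifs <;> simp_all
  · have hj' : i.toNat ≠ j := fun h => hj h.symm
    have hset : ∀ v : Int, (ans.set i.toNat v)[j]? = ans[j]? := fun v => List.getElem?_set_ne hj'
    rw [if_neg hj]
    split_ifs <;> simp [hset]

/-- Loop invariant for A's fold over a list of in-range indices. -/
lemma foldl_inv (like dislike itemsList : List String) (is : List Int)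
    (hb : ∀ i ∈ is, 0 ≤ i ∧ i.toNat < itemsList.length) (ans : List Int)
    (hlen : ans.length = itemsList.length) :
    (is.foldl (pvStep like dislike itemsList) ans).length = itemsList.length ∧
    ∀ (j : Nat) (hj : j < itemsList.length),
      (is.foldl (pvStep like dislike itemsList) ans)[j]? =
        if (j : Int) ∈ is then (pvMark like dislike (itemsList[j]'hj)).or ans[j]? else ans[j]? := by
  induction is generalizing ans with
  | nil => exact ⟨hlen, fun j hj => by simp⟩
  | cons i is ih =>
    have hi := hb i (List.mem_cons_self ..)
    have hb' : ∀ x ∈ is, 0 ≤ x ∧ x.toNat < itemsList.length :=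
      fun x hx => hb x (List.mem_cons_of_mem _ hx)
    have hlen' : (pvStep like dislike itemsList ans i).length = itemsList.length := by
      unfold pvStep; split
      · split_ifs <;> simp [hlen]
      · exact hlen
    obtain ⟨ihlen, ihget⟩ := ih hb' (pvStep like dislike itemsList ans i) hlen'
    refine ⟨by simpa using ihlen, fun j hj => ?_⟩
    rw [List.foldl_cons, ihget j hj,
        step_getElem? like dislike itemsList ans hlen i hi.1 hi.2 j]
    by_cases hji : (j : Int) = i
    · have hj1 : j = i.toNat := by omega
      have hmem : (j : Int) ∈ i :: is := List.mem_cons.mpr (Or.inl hji)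
      have hval : itemsList[i.toNat]'hi.2 = itemsList[j]'hj := by simp only [← hj1]
      rw [if_pos hmem, if_pos hj1, hval]
      by_cases hjs : (j : Int) ∈ is
      · rw [if_pos hjs]
        cases pvMark like dislike (itemsList[j]'hj) <;> simp
      · rw [if_neg hjs]
    · have hj1 : j ≠ i.toNat := by omega
      rw [if_neg hj1]
      have hmem : ((j : Int) ∈ i :: is) ↔ ((j : Int) ∈ is) := by
        simp [List.mem_cons, hji]
      by_cases hjs : (j : Int) ∈ is
      · rw [if_pos hjs, if_pos (hmem.mpr hjs)]
      · rw [if_neg hjs, if_neg (fun h => hjs (hmem.mp h))]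

/-- Lookup in the fold building the positions dict. -/
lemma posFold_getD (l : List (Int × String)) (d : PySem.Dict String (List Int)) (s : String) :
    (l.foldl (fun d p => d.insert p.2 (d.getD p.2 [] ++ [p.1])) d).getD s []
      = d.getD s [] ++ ((l.filter (fun p => p.2 == s)).map (·.1)) := by
  induction l generalizing d with
  | nil => simp
  | cons p l ih =>
    simp only [List.foldl_cons, ih, List.filter_cons, PySem.Dict.getD_insert]
    by_cases h : p.2 = s
    · simp [h]
    · have h' : ¬ s = p.2 := fun e => h e.symm
      simp [h, h']

/-- Membership in a positions bucket ⟷ that index holds that item. -/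
lemma mem_pvPos (itemsList : List String) (s : String) (j : Int) :
    j ∈ (pvPos itemsList).getD s [] ↔
      ∃ (k : Nat) (h : k < itemsList.length), itemsList[k] = s ∧ j = (k : Int) := by
  unfold pvPos
  rw [posFold_getD]
  simp only [PySem.Dict.getD_empty, List.nil_append, List.mem_map, List.mem_filter]
  constructor
  · rintro ⟨p, ⟨hp, hps⟩, hpj⟩
    obtain ⟨k, hk, rfl⟩ := (PySem.List.mem_enumerate_iff _ _ _).mp hp
    exact ⟨k, hk, by simpa using (beq_iff_eq).mp hps, by simpa using hpj.symm⟩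
  · rintro ⟨k, hk, hks, rfl⟩
    refine ⟨((k : Int), itemsList[k]), ⟨?_, by simpa using hks⟩, rfl⟩
    exact (PySem.List.mem_enumerate_iff _ _ _).mpr ⟨k, hk, by simp⟩

/-- Writing one value `v` at every index of `is` (all nonnegative): effect on `getElem?`. -/
lemma setAll_getElem? (is : List Int) (hnn : ∀ i ∈ is, 0 ≤ i) (v : Int) (ans : List Int) (j : Nat) :
    (is.foldl (fun a i => a.set i.toNat v) ans).length = ans.length ∧
    (is.foldl (fun a i => a.set i.toNat v) ans)[j]? =
      if (j : Int) ∈ is ∧ j < ans.length then some v else ans[j]? := by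
  induction is generalizing ans with
  | nil => simp
  | cons i is ih =>
    have hi0 : 0 ≤ i := hnn i (List.mem_cons_self ..)
    have hnn' : ∀ x ∈ is, 0 ≤ x := fun x hx => hnn x (List.mem_cons_of_mem _ hx)
    obtain ⟨ihlen, ihget⟩ := ih hnn' (ans.set i.toNat v)
    refine ⟨by simpa using ihlen, ?_⟩
    rw [List.foldl_cons, ihget, List.length_set]
    by_cases hji : (j : Int) = i
    · have hj1 : i.toNat = j := by omega
      have hcons : (j : Int) ∈ i :: is := List.mem_cons.mpr (Or.inl hji)
      by_cases hjl : j < ans.length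
      · have hL : (ans.set i.toNat v)[j]? = some v := by
          rw [hj1]; exact List.getElem?_set_self (by simpa using hjl)
        by_cases hjs : (j : Int) ∈ is
        · rw [if_pos ⟨hjs, by simpa using hjl⟩, if_pos ⟨hcons, hjl⟩]
        · rw [if_neg (fun h => hjs h.1), hL, if_pos ⟨hcons, hjl⟩]
      · have hnone : ans[j]? = none := List.getElem?_eq_none (by omega)
        have hnone' : (ans.set i.toNat v)[j]? = none :=
          List.getElem?_eq_none (by simp; omega)
        rw [if_neg (fun h => hjl (by simpa using h.2)), hnone', if_neg (fun h => hjl h.2), hnone]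
    · have hj1 : i.toNat ≠ j := by omega
      have hset : (ans.set i.toNat v)[j]? = ans[j]? := List.getElem?_set_ne hj1
      rw [hset]
      by_cases hjs : (j : Int) ∈ is <;> simp [hjs, List.mem_cons, hji]

/-- Scattering one value over the position buckets of a list of items. -/
lemma scatter_inv (itemsList : List String) (items : List String) (v : Int) (ans : List Int)
    (hlen : ans.length = itemsList.length) :
    (items.foldl (fun a item =>
        ((pvPos itemsList).getD item []).foldl (fun a i => a.set i.toNat v) a) ans).length
      = itemsList.length ∧
    ∀ (j : Nat) (hj : j < itemsList.length),
      (items.foldl (fun a item =>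
        ((pvPos itemsList).getD item []).foldl (fun a i => a.set i.toNat v) a) ans)[j]? =
        if itemsList[j] ∈ items then some v else ans[j]? := by
  induction items generalizing ans with
  | nil => exact ⟨hlen, fun j hj => by simp⟩
  | cons it its ih =>
    have hnn : ∀ i ∈ (pvPos itemsList).getD it [], 0 ≤ i := by
      intro i hi
      obtain ⟨k, hk, _, rfl⟩ := (mem_pvPos itemsList it i).mp hi
      exact Int.natCast_nonneg k
    set ans' := ((pvPos itemsList).getD it []).foldl (fun a i => a.set i.toNat v) ans with hans'
    have hlen' : ans'.length = itemsList.length := by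
      rw [hans', (setAll_getElem? _ hnn v ans 0).1, hlen]
    obtain ⟨ihlen, ihget⟩ := ih ans' hlen'
    refine ⟨by simpa using ihlen, fun j hj => ?_⟩
    rw [List.foldl_cons, ihget j hj]
    have hget' : ans'[j]? = if itemsList[j] = it then some v else ans[j]? := by
      rw [hans', (setAll_getElem? _ hnn v ans j).2]
      by_cases hjit : itemsList[j] = it
      · have hmem : (j : Int) ∈ (pvPos itemsList).getD it [] :=
          (mem_pvPos itemsList it (j : Int)).mpr ⟨j, hj, hjit, rfl⟩
        simp [hmem, hjit, hlen ▸ hj]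
      · have hmem : ¬ (j : Int) ∈ (pvPos itemsList).getD it [] := by
          intro h
          obtain ⟨k, hk, hks, hkj⟩ := (mem_pvPos itemsList it (j : Int)).mp h
          have : k = j := by omega
          exact hjit (this ▸ hks)
        simp [hmem, hjit]
    by_cases hits : itemsList[j] ∈ its
    · simp [hits]
    · rw [if_neg hits, hget']
      by_cases hjit : itemsList[j] = it <;> simp [hjit, hits]

-- ===== VERDICT =====
theorem createClientChoiceGenome_spec : Claim_equal_createClientChoiceGenome := by
  intro like dislike itemsList _
  show createClientChoiceGenome like dislike itemsList = createClientChoiceGenome_alt like dislike itemsList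
  have hA : createClientChoiceGenome like dislike itemsList
      = (PySem.List.pyRange 0 (itemsList.length : Int) 1).foldl
          (pvStep like dislike itemsList) (List.replicate itemsList.length (-1 : Int)) := rfl
  have hB : createClientChoiceGenome_alt like dislike itemsList
      = like.foldl (fun a item =>
          ((pvPos itemsList).getD item []).foldl (fun a i => a.set i.toNat (1 : Int)) a)
          (dislike.foldl (fun a item =>
            ((pvPos itemsList).getD item []).foldl (fun a i => a.set i.toNat (0 : Int)) a)
            (List.replicate itemsList.length (-1 : Int))) := rfl
  rw [hA, hB]
  have hb : ∀ i ∈ PySem.List.pyRange 0 (itemsList.length : Int) 1,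
      0 ≤ i ∧ i.toNat < itemsList.length := by
    intro i hi
    rw [PySem.List.mem_pyRange_one] at hi
    omega
  obtain ⟨hAlen, hAget⟩ := foldl_inv like dislike itemsList _ hb
    (List.replicate itemsList.length (-1 : Int)) (by simp)
  obtain ⟨hDlen, hDget⟩ := scatter_inv itemsList dislike 0
    (List.replicate itemsList.length (-1 : Int)) (by simp)
  obtain ⟨hLlen, hLget⟩ := scatter_inv itemsList like 1 _ hDlen
  refine List.ext_getElem? fun j => ?_
  by_cases hj : j < itemsList.length
  · have hjr : (j : Int) ∈ PySem.List.pyRange 0 (itemsList.length : Int) 1 := by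
      rw [PySem.List.mem_pyRange_one]; omega
    rw [hAget j hj, if_pos hjr, hLget j hj]
    unfold pvMark
    by_cases hl : itemsList[j] ∈ like
    · simp [hl]
    · rw [if_neg hl, hDget j hj]
      by_cases hd : itemsList[j] ∈ dislike <;>
        simp [hl, hd, hj]
  · refine (List.getElem?_eq_none (by rw [hAlen]; omega)).trans
      (List.getElem?_eq_none (by rw [hLlen]; omega)).symm
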